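-- pv_equiv track=rewrite | github.com/Protonk/wedoincircles | n-gons/counting/build_psi_table.py | psi_value
-- ===== SOURCE A (Python) =====
-- def psi_value(n):
--     if n == 1 or n == 2:
--         return 0
--     total = 0
--     remaining = n
--     p = 2
--     while p * p <= remaining:
--         if remaining % p == 0:
--             exp = 0
--             while remaining % p == 0:
--                 remaining //= p
--                 exp += 1
--             total += psi_prime_power(p, exp)
--         p = 3 if p == 2 else p + 2
--     if remaining > 1:
--         total += psi_prime_power(remaining, 1)
--     return total
--
-- def psi_prime_power(p, exp):
--     if p == 2:
--         if exp == 1: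
--             return 0
--         return 2 ** (exp - 1)
--     return (p ** exp) - (p ** (exp - 1))
-- ===== SOURCE B (Python) =====
-- def psi_prime_power(p, exp):
--     if p == 2:
--         if exp == 1:
--             return 0
--         return 2 ** (exp - 1)
--     return (p ** exp) - (p ** (exp - 1))
--
-- def psi_value(n):
--     # Phase 1: collect prime factors one at a time into a flat list.
--     factors = []
--     m = n
--     p = 2
--     while p * p <= m:
--         if m % p == 0:
--             factors.append(p)
--             m //= p
--         else:
--             p = 3 if p == 2 else p + 2
--     if m > 1:
--         factors.append(m)
--     # Phase 2: group the flat list into (prime, exponent) counts.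
--     counts = {}
--     for q in factors:
--         counts[q] = counts.get(q, 0) + 1
--     # Phase 3: aggregate.
--     return sum(psi_prime_power(q, e) for q, e in counts.items())
-- ===== Notes on version B (the rewrite author's own statement) =====
-- stated objective: alternative
-- what changed: A's single fused trial-division loop (inner exponent-counting while-loop plus a running psi total) is replaced by three phases: a flat loop that splits off one prime factor per iteration, a dict pass grouping the flat factor list into exponent counts, and a final sum of psi_prime_power over the grouped items.
import Mathlib
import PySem

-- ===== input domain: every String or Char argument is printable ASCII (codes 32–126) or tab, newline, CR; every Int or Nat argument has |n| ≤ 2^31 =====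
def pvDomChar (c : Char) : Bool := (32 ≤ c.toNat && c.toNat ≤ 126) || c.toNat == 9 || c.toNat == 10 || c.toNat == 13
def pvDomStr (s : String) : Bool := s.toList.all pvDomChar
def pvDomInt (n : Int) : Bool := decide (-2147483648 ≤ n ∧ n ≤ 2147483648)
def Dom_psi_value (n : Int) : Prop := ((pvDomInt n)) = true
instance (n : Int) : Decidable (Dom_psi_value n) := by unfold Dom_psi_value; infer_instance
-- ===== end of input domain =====

-- B replaces A's nested trial-division (inner exponent loop + running total) by three phases:
-- collect a flat list of prime factors one division at a time, group it with a dict of counts,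
-- then sum psi_prime_power over the grouped items; objective: alternative decomposition, same cost.

-- small arithmetic lemmas cited by the loops' decreasing_by proofs (kept tiny on purpose)
theorem pv_fd_lt (m p : Int) (h : 0 < m) (hp : 2 ≤ p) : PySem.Int.floordiv m p < m :=
  (PySem.Int.floordiv_lt_iff_lt_mul (by omega)).mpr ((lt_mul_iff_one_lt_right h).mpr (by omega))

theorem pv_ediv_lt (a b : Int) (h : 0 < a) (h2 : 1 < b) : a / b < a := by
  rw [← PySem.Int.floordiv_eq_ediv_of_pos (by omega : (0:Int) < b)]
  exact pv_fd_lt a b h (by omega)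

theorem pv_p_le_m (p m : Int) (h : p * p ≤ m) : p ≤ m := by
  rcases le_or_gt p 0 with h0 | h0
  · exact le_trans h0 (le_trans (mul_self_nonneg p) h)
  · exact le_trans (le_mul_of_one_le_left h0.le (by omega)) h

theorem pv_pos_of_sq_le (p m : Int) (hp : 2 ≤ p) (h : p * p ≤ m) : 0 < m :=
  lt_of_lt_of_le (mul_pos (by omega) (by omega)) h

theorem pv_dec_inner (p m : Int) (h : 0 < m) (hp : 2 ≤ p) :
    (PySem.Int.floordiv m p).toNat < m.toNat :=
  (Int.toNat_lt_toNat h).mpr (pv_fd_lt m p h hp)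

theorem pv_dec_div (m p : Int) (h : p * p ≤ m) (hp : 2 ≤ p) :
    (PySem.Int.floordiv m p + 1 - p).toNat < (m + 1 - p).toNat := by
  have h0 := pv_pos_of_sq_le p m hp h
  have h2 := pv_fd_lt m p h0 hp
  have h3 := pv_p_le_m p m h
  exact (Int.toNat_lt_toNat (by omega)).mpr (by omega)

theorem pv_dec_adv (m p : Int) (h : p * p ≤ m) :
    (m + 1 - (if p = 2 then 3 else p + 2)).toNat < (m + 1 - p).toNat := by
  have h3 := pv_p_le_m p m h
  refine (Int.toNat_lt_toNat (by omega)).mpr ?_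
  split <;> omega

-- ===== PORT A =====
-- Python ** is ported with a .toNat exponent: exact for exp ≥ 1, the only exponents either program passes.
def psi_prime_power (p exp : Int) : Int :=
  if p = 2 then
    if exp = 1 then 0 else 2 ^ (exp - 1).toNat
  else p ^ exp.toNat - p ^ (exp - 1).toNat

-- A's inner while-loop: divide out p, counting the exponent.  The '0 < m ∧ 2 ≤ p' parts of the
-- guard are totality guards only (they hold whenever psi_value reaches this loop).
def psiInner (p m exp : Int) : Int × Int :=
  if h : 0 < m ∧ 2 ≤ p ∧ PySem.Int.mod m p = 0 then
    psiInner p (PySem.Int.floordiv m p) (exp + 1)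
  else (m, exp)
termination_by m.toNat
decreasing_by exact pv_dec_inner p m h.1 h.2.1

-- the inner loop never increases the remaining value (used for the outer loop's termination)
theorem psiInner_fst_le (p m exp : Int) : (psiInner p m exp).1 ≤ m := by
  rw [psiInner]
  split
  · rename_i h
    have hfd : PySem.Int.floordiv m p = m / p :=
      PySem.Int.floordiv_eq_ediv_of_pos (by omega : (0:Int) < p)
    have h2 : m / p < m := pv_ediv_lt _ _ h.1 (by omega)
    have := psiInner_fst_le p (PySem.Int.floordiv m p) (exp + 1)
    omega
  · exact le_refl m
termination_by m.toNat
decreasing_by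
  rename_i h
  exact pv_dec_inner p m h.1 h.2.1

theorem pv_dec_outer (m p : Int) (h : p * p ≤ m) :
    ((psiInner p m 0).1 + 1 - (if p = 2 then 3 else p + 2)).toNat < (m + 1 - p).toNat := by
  have h1 := psiInner_fst_le p m 0
  have h3 := pv_p_le_m p m h
  refine (Int.toNat_lt_toNat (by omega)).mpr ?_
  split <;> omega

-- A's outer while-loop
def psiOuter (total m p : Int) : Int :=
  if h : p * p ≤ m then
    if PySem.Int.mod m p = 0 then
      let r := psiInner p m 0
      psiOuter (total + psi_prime_power p r.2) r.1 (if p = 2 then 3 else p + 2)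
    else
      psiOuter total m (if p = 2 then 3 else p + 2)
  else
    if m > 1 then total + psi_prime_power m 1 else total
termination_by (m + 1 - p).toNat
decreasing_by
  · exact pv_dec_outer m p h
  · exact pv_dec_adv m p h

def psi_value (n : Int) : Int :=
  if n = 1 ∨ n = 2 then 0 else psiOuter 0 n 2

-- ===== PORT B =====
-- B's factor-collecting while-loop; one prime factor is split off per iteration (no inner loop).
-- The '2 ≤ p' part of the divisibility test is a totality guard only (p starts at 2 and only grows).
def bFactor (acc : List Int) (m p : Int) : List Int :=
  if h : p * p ≤ m then
    if h2 : PySem.Int.mod m p = 0 ∧ 2 ≤ p then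
      bFactor (acc ++ [p]) (PySem.Int.floordiv m p) p
    else
      bFactor acc m (if p = 2 then 3 else p + 2)
  else
    if m > 1 then acc ++ [m] else acc
termination_by (m + 1 - p).toNat
decreasing_by
  · exact pv_dec_div m p h h2.2
  · exact pv_dec_adv m p h

def psi_value_alt (n : Int) : Int :=
  let factors := bFactor [] n 2
  let counts := factors.foldl (fun d q => d.insert q (d.getD q 0 + 1)) PySem.Dict.empty
  counts.items.foldl (fun t qe => t + psi_prime_power qe.1 qe.2) 0

-- ===== PRECONDITION & SPEC =====
def Spec_psi_value (n : Int) (out : Int) : Prop := out = psi_value_alt n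
instance (n : Int) (out : Int) : Decidable (Spec_psi_value n out) := by unfold Spec_psi_value; infer_instance

-- ===== CLAIM (what is proved, stated in full; the proofs are below) =====
def Claim_equal_psi_value : Prop := ∀ (n : Int), Dom_psi_value n → Spec_psi_value n (psi_value n)

-- ===== LEMMAS AND PROOFS =====

theorem pv_dec_half (m p : Int) (h : 0 < m) (hp : 2 ≤ p) : (m / p).toNat < m.toNat := by
  rw [← PySem.Int.floordiv_eq_ediv_of_pos (by omega : (0:Int) < p)]
  exact pv_dec_inner p m h hp

theorem pv_dec_div' (m p : Int) (h : p * p ≤ m) (hp : 2 ≤ p) :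
    (m / p + 1 - p).toNat < (m + 1 - p).toNat := by
  have h0 := pv_pos_of_sq_le p m hp h
  have h2 := pv_ediv_lt m p h0 (by omega)
  have h3 := pv_p_le_m p m h
  exact (Int.toNat_lt_toNat (by omega)).mpr (by omega)

-- grouped-and-summed value of a flat factor list (what B's phases 2 and 3 compute)
def sumPsi (l : List Int) : Int :=
  ((PySem.Dict.counter l).items).foldl (fun t qe => t + psi_prime_power qe.1 qe.2) 0

theorem psi_value_alt_eq (n : Int) : psi_value_alt n = sumPsi (bFactor [] n 2) := by
  show (((bFactor [] n 2).foldl (fun d q => d.insert q (d.getD q 0 + 1)) PySem.Dict.empty).items).foldl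
      (fun t qe => t + psi_prime_power qe.1 qe.2) 0 = _
  rw [PySem.Dict.foldl_insert_getD_add_one_eq_counter]
  rfl

theorem sumPsi_nil : sumPsi [] = 0 := by decide

theorem sumPsi_single (x : Int) : sumPsi [x] = psi_prime_power x 1 := by
  unfold sumPsi
  rw [PySem.Dict.items_counter]
  have h1 : PySem.Set.ofList [x] = [x] := by
    rw [PySem.Set.ofList_cons]
    simp [PySem.Set.discard, PySem.Set.ofList]
  rw [h1]
  simp

theorem sumPsi_replicate_append (e : Nat) (he : 1 ≤ e) (p : Int) (rest : List Int)
    (hp : p ∉ rest) :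
    sumPsi (List.replicate e p ++ rest) = psi_prime_power p (e : Int) + sumPsi rest := by
  have hofrep : PySem.Set.ofList (List.replicate e p) = [p] := by
    induction e with
    | zero => omega
    | succ e ih =>
      rw [List.replicate_succ, PySem.Set.ofList_cons]
      rcases Nat.eq_zero_or_pos e with rfl | hpos
      · simp [PySem.Set.discard, PySem.Set.ofList]
      · rw [ih hpos]
        simp [PySem.Set.discard]
  have hof : PySem.Set.ofList (List.replicate e p ++ rest) = p :: PySem.Set.ofList rest := by
    rw [PySem.Set.ofList_append, PySem.Set.update_eq_append_filter, hofrep]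
    have : ∀ y ∈ PySem.Set.ofList rest, (!PySem.Set.contains [p] y) = true := by
      intro y hy
      have hyr : y ∈ rest := (PySem.Set.mem_ofList rest y).mp hy
      have : y ≠ p := fun hc => hp (hc ▸ hyr)
      simp [PySem.Set.contains, this]
    rw [List.filter_eq_self.mpr this]
    rfl
  unfold sumPsi
  rw [PySem.Dict.items_counter, PySem.Dict.items_counter, hof,
    PySem.List.foldl_add (g := fun qe : Int × Int => psi_prime_power qe.1 qe.2),
    PySem.List.foldl_add (g := fun qe : Int × Int => psi_prime_power qe.1 qe.2)]
  simp only [List.map_cons, List.map_map, List.sum_cons]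
  have hcp : List.count p (List.replicate e p ++ rest) = e := by
    rw [List.count_append, List.count_replicate, List.count_eq_zero.mpr hp]
    simp
  have hck : ∀ k ∈ PySem.Set.ofList rest,
      List.count k (List.replicate e p ++ rest) = List.count k rest := by
    intro k hk
    have hkr : k ∈ rest := (PySem.Set.mem_ofList rest k).mp hk
    have hkp : p ≠ k := fun hc => hp (hc ▸ hkr)
    rw [List.count_append, List.count_replicate, if_neg (by simp [hkp])]
    simp
  rw [hcp]
  have hmaps : ((PySem.Set.ofList rest).map
        ((fun qe => psi_prime_power qe.1 qe.2) ∘ fun k => (k, (List.count k (List.replicate e p ++ rest) : Int)))) =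
      ((PySem.Set.ofList rest).map
        ((fun qe => psi_prime_power qe.1 qe.2) ∘ fun k => (k, (List.count k rest : Int)))) := by
    apply List.map_congr_left
    intro k hk
    simp only [Function.comp_apply]
    rw [hck k hk]
  rw [hmaps]
  ring

-- accumulator lemma for B's loop
theorem bFactor_acc (acc : List Int) (m p : Int) :
    bFactor acc m p = acc ++ bFactor [] m p := by
  by_cases h : p * p ≤ m
  · by_cases h2 : PySem.Int.mod m p = 0 ∧ 2 ≤ p
    · rw [bFactor, dif_pos h, dif_pos h2,
        bFactor_acc (acc ++ [p]) (PySem.Int.floordiv m p) p]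
      conv_rhs => rw [bFactor, dif_pos h, dif_pos h2,
        bFactor_acc ([] ++ [p]) (PySem.Int.floordiv m p) p]
      simp
    · rw [bFactor, dif_pos h, dif_neg h2, bFactor_acc acc m _]
      conv_rhs => rw [bFactor, dif_pos h, dif_neg h2, bFactor_acc ([] : List Int) m _]
      simp
  · rw [bFactor, dif_neg h]
    conv_rhs => rw [bFactor, dif_neg h]
    split <;> simp
termination_by (m + 1 - p).toNat
decreasing_by
  all_goals first
  | exact pv_dec_div m p h h2.2
  | exact pv_dec_div' m p h h2.2
  | exact pv_dec_adv m p h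

-- every collected factor divides the remaining value the loop started from
theorem bFactor_dvd (m p : Int) : ∀ e ∈ bFactor [] m p, e ∣ m := by
  by_cases h : p * p ≤ m
  · by_cases h2 : PySem.Int.mod m p = 0 ∧ 2 ≤ p
    · rw [bFactor, dif_pos h, dif_pos h2, bFactor_acc]
      have hdvd : p ∣ m := (PySem.Int.mod_eq_zero_iff_dvd m p).mp h2.1
      have hfd : PySem.Int.floordiv m p = m / p :=
        PySem.Int.floordiv_eq_ediv_of_pos (by omega : (0:Int) < p)
      have hdm : m / p ∣ m := ⟨p, (Int.ediv_mul_cancel hdvd).symm⟩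
      intro e he
      rcases List.mem_append.mp he with he | he
      · rcases List.mem_singleton.mp he with rfl
        exact hdvd
      · rw [hfd] at he
        exact dvd_trans (bFactor_dvd (m / p) p e he) hdm
    · rw [bFactor, dif_pos h, dif_neg h2]
      exact bFactor_dvd m _
  · rw [bFactor, dif_neg h]
    split
    · intro e he
      rcases List.mem_singleton.mp he with rfl
      exact dvd_rfl
    · simp
termination_by (m + 1 - p).toNat
decreasing_by
  all_goals first
  | exact pv_dec_div m p h h2.2
  | exact pv_dec_div' m p h h2.2
  | exact pv_dec_adv m p h

-- exponent accumulator shift for A's inner loop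
theorem psiInner_shift (p m e : Int) :
    psiInner p m e = ((psiInner p m 0).1, e + (psiInner p m 0).2) := by
  by_cases h : 0 < m ∧ 2 ≤ p ∧ PySem.Int.mod m p = 0
  · rw [psiInner, dif_pos h, psiInner_shift p _ (e+1)]
    conv_rhs => rw [psiInner, dif_pos h]
    simp only [zero_add]
    rw [psiInner_shift p _ 1]
    simp; omega
  · rw [psiInner, dif_neg h]
    conv_rhs => rw [psiInner, dif_neg h]
    simp
termination_by m.toNat
decreasing_by all_goals exact pv_dec_inner p m h.1 h.2.1

-- characterisation of A's inner loop
theorem psiInner_spec (p m : Int) (hp : 2 ≤ p) (hm : 0 < m) :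
    0 < (psiInner p m 0).1 ∧ ¬ (p ∣ (psiInner p m 0).1) ∧
    m = (psiInner p m 0).1 * p ^ (psiInner p m 0).2.toNat ∧ 0 ≤ (psiInner p m 0).2 ∧
    (PySem.Int.mod m p = 0 → 1 ≤ (psiInner p m 0).2) := by
  by_cases h : 0 < m ∧ 2 ≤ p ∧ PySem.Int.mod m p = 0
  · have hdvd : p ∣ m := (PySem.Int.mod_eq_zero_iff_dvd m p).mp h.2.2
    have hfd : PySem.Int.floordiv m p = m / p :=
      PySem.Int.floordiv_eq_ediv_of_pos (by omega : (0:Int) < p)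
    have hmp : 0 < m / p := by
      rcases hdvd with ⟨c, hc⟩
      have : m / p = c := by rw [hc, Int.mul_ediv_cancel_left _ (by omega : p ≠ 0)]
      nlinarith
    have ih := psiInner_spec p (m / p) hp hmp
    rw [psiInner, dif_pos h, hfd]
    simp only [zero_add]
    rw [psiInner_shift p _ 1]
    refine ⟨ih.1, ih.2.1, ?_, by omega, fun _ => by omega⟩
    have hk : (1 + (psiInner p (m/p) 0).2).toNat = (psiInner p (m/p) 0).2.toNat + 1 := by omega
    have hmm : m = m / p * p := (Int.ediv_mul_cancel hdvd).symm
    show m = (psiInner p (m/p) 0).1 * p ^ ((1 + (psiInner p (m/p) 0).2).toNat)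
    rw [hk, pow_succ]
    conv_lhs => rw [hmm, ih.2.2.1]
    ring
  · rw [psiInner, dif_neg h]
    have hnd : ¬ PySem.Int.mod m p = 0 := by tauto
    refine ⟨hm, ?_, by simp, by omega, fun hc => absurd hc hnd⟩
    intro hdvd
    exact hnd ((PySem.Int.mod_eq_zero_iff_dvd m p).mpr hdvd)
termination_by m.toNat
decreasing_by exact pv_dec_half m p hm hp

-- on a remaining value with no factor below p, B's loop splits off exactly A's inner-loop run
theorem bFactor_div (m p : Int) (hp : 2 ≤ p) (hm : p * p ≤ m)
    (hd : PySem.Int.mod m p = 0) (hinv : ∀ q, 2 ≤ q → q < p → ¬ q ∣ m) :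
    bFactor [] m p =
      List.replicate (psiInner p m 0).2.toNat p ++
        bFactor [] (psiInner p m 0).1 (if p = 2 then 3 else p + 2) := by
  have hm0 : 0 < m := by nlinarith
  have hdvd : p ∣ m := (PySem.Int.mod_eq_zero_iff_dvd m p).mp hd
  have hfd : PySem.Int.floordiv m p = m / p :=
    PySem.Int.floordiv_eq_ediv_of_pos (by omega : (0:Int) < p)
  have hmp_ge : p ≤ m / p := Int.le_ediv_iff_mul_le (by omega : (0:Int) < p) |>.mpr hm
  have hmp0 : 0 < m / p := by omega
  have hLHS : bFactor [] m p = [p] ++ bFactor [] (m / p) p := by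
    rw [bFactor, dif_pos hm, dif_pos ⟨hd, hp⟩, bFactor_acc, hfd]
    simp
  have hpsi : psiInner p m 0 = ((psiInner p (m/p) 0).1, 1 + (psiInner p (m/p) 0).2) := by
    rw [psiInner, dif_pos ⟨hm0, hp, hd⟩]
    simp only [zero_add]
    rw [psiInner_shift p _ 1, hfd]
  have hspec2 := psiInner_spec p (m/p) hp hmp0
  by_cases hd2 : PySem.Int.mod (m/p) p = 0
  · by_cases hsq : p * p ≤ m / p
    · have hinv2 : ∀ q, 2 ≤ q → q < p → ¬ q ∣ m / p := by
        intro q hq1 hq2 hq3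
        exact hinv q hq1 hq2 (dvd_trans hq3 ⟨p, (Int.ediv_mul_cancel hdvd).symm⟩)
      have ih := bFactor_div (m/p) p hp hsq hd2 hinv2
      rw [hLHS, ih, hpsi]
      have hk : (1 + (psiInner p (m/p) 0).2).toNat = (psiInner p (m/p) 0).2.toNat + 1 := by
        omega
      simp only [hk, List.replicate_succ]
      simp
    · -- here m / p must equal p: its cofactor t divides m, is < p and positive, so t = 1
      have hdvd2 : p ∣ m / p := (PySem.Int.mod_eq_zero_iff_dvd _ p).mp hd2
      have ht : m / p / p ∣ m :=
        dvd_trans ⟨p, (Int.ediv_mul_cancel hdvd2).symm⟩ ⟨p, (Int.ediv_mul_cancel hdvd).symm⟩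
      have htp : m / p = (m / p / p) * p := (Int.ediv_mul_cancel hdvd2).symm
      have htlt : m / p / p < p := by nlinarith [htp]
      have ht1 : 1 ≤ m / p / p := by nlinarith [htp]
      have hteq : m / p / p = 1 := by
        by_contra hne
        exact hinv (m / p / p) (by omega) htlt ht
      have hmpp : m / p = p := by rw [htp, hteq]; ring
      have hpsi2 : psiInner p (m/p) 0 = (1, 1) := by
        rw [hmpp, psiInner, dif_pos ⟨by omega, hp, (PySem.Int.mod_eq_zero_iff_dvd p p).mpr dvd_rfl⟩]
        have : PySem.Int.floordiv p p = 1 := by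
          rw [PySem.Int.floordiv_eq_ediv_of_pos (by omega : (0:Int) < p), Int.ediv_self (by omega)]
        have hne : ¬ (0 < (1:Int) ∧ 2 ≤ p ∧ PySem.Int.mod 1 p = 0) := by
          have h1 : PySem.Int.mod 1 p = 1 := by
            rw [PySem.Int.mod_eq_emod_of_pos (by omega : (0:Int) < p), Int.emod_eq_of_lt] <;> omega
          simp [h1]
        rw [this, psiInner, dif_neg hne]
        norm_num
      have hFp : bFactor [] p p = [p] := by
        rw [bFactor, dif_neg (by nlinarith : ¬ p * p ≤ p), if_pos (by omega : p > 1)]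
        simp
      have hF1 : bFactor [] 1 (if p = 2 then 3 else p + 2) = [] := by
        rw [bFactor, dif_neg, if_neg (by omega : ¬ (1:Int) > 1)]
        split <;> nlinarith
      rw [hLHS, hmpp, hFp, hpsi, hpsi2, hF1]
      simp [List.replicate_succ]
  · have hpsi2 : psiInner p (m/p) 0 = (m/p, 0) := by
      rw [psiInner, dif_neg]
      tauto
    rw [hLHS, hpsi, hpsi2]
    have hF : bFactor [] (m/p) p = bFactor [] (m/p) (if p = 2 then 3 else p + 2) := by
      by_cases hsq : p * p ≤ m / p
      · rw [bFactor, dif_pos hsq, dif_neg (by tauto)]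
      · rw [bFactor, dif_neg hsq]
        conv_rhs => rw [bFactor, dif_neg (by split <;> nlinarith : ¬ (if p = 2 then (3:Int) else p + 2) * (if p = 2 then (3:Int) else p + 2) ≤ m / p)]
    rw [hF]
    simp [List.replicate_succ]
termination_by (m + 1 - p).toNat
decreasing_by exact pv_dec_div' m p hm hp

-- the main simulation: A's fused loop equals B's collect-then-group pipeline
theorem psiOuter_eq_sumPsi (total m p : Int) (hp : 2 ≤ p) (hodd : p = 2 ∨ p % 2 = 1)
    (hinv : ∀ q, 2 ≤ q → q < p → ¬ q ∣ m) :
    psiOuter total m p = total + sumPsi (bFactor [] m p) := by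
  have hp2gt : 2 < p ∨ p = 2 := by rcases hodd with h | h <;> omega
  have hpgt : p < (if p = 2 then 3 else p + 2) := by split <;> omega
  have hple : (if p = 2 then 3 else p + 2) ≤ p + 2 := by split <;> omega
  have hp' : 2 ≤ (if p = 2 then 3 else p + 2) := by omega
  have hodd' : (if p = 2 then 3 else p + 2) = 2 ∨ (if p = 2 then 3 else p + 2) % 2 = 1 := by
    rcases hodd with h | h <;> [skip; skip] <;> right <;> split <;> omega
  by_cases h : p * p ≤ m
  · have hm0 : 0 < m := by nlinarith
    by_cases hd : PySem.Int.mod m p = 0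
    · have spec := psiInner_spec p m hp hm0
      have hr1m : (psiInner p m 0).1 ∣ m := Dvd.intro _ spec.2.2.1.symm
      have hinv' : ∀ q, 2 ≤ q → q < (if p = 2 then 3 else p + 2) → ¬ q ∣ (psiInner p m 0).1 := by
        intro q hq1 hq2 hq3
        rcases lt_trichotomy q p with hlt | rfl | hgt
        · exact hinv q hq1 hlt (dvd_trans hq3 hr1m)
        · exact spec.2.1 hq3
        · have hq2' : q = p + 1 := by omega
          have hpodd : p % 2 = 1 := by rcases hodd with h2 | h2 <;> omega
          have h2q : (2 : Int) ∣ q := Int.dvd_of_emod_eq_zero (by omega)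
          exact hinv 2 (by omega) (by omega) (dvd_trans h2q (dvd_trans hq3 hr1m))
      have ih := psiOuter_eq_sumPsi (total + psi_prime_power p (psiInner p m 0).2)
        (psiInner p m 0).1 (if p = 2 then 3 else p + 2) hp' hodd' hinv'
      rw [psiOuter, dif_pos h, if_pos hd]
      show psiOuter (total + psi_prime_power p (psiInner p m 0).2) (psiInner p m 0).1 _ = _
      rw [ih, bFactor_div m p hp h hd hinv,
        sumPsi_replicate_append (psiInner p m 0).2.toNat (by have := spec.2.2.2.2 hd; omega) p _
          (by
            intro hmem
            exact spec.2.1 (bFactor_dvd _ _ p hmem)),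
        Int.toNat_of_nonneg spec.2.2.2.1]
      ring
    · have hinv' : ∀ q, 2 ≤ q → q < (if p = 2 then 3 else p + 2) → ¬ q ∣ m := by
        intro q hq1 hq2 hq3
        rcases lt_trichotomy q p with hlt | rfl | hgt
        · exact hinv q hq1 hlt hq3
        · exact hd ((PySem.Int.mod_eq_zero_iff_dvd m q).mpr hq3)
        · have hq2' : q = p + 1 := by omega
          have hpodd : p % 2 = 1 := by rcases hodd with h2 | h2 <;> omega
          have h2q : (2 : Int) ∣ q := Int.dvd_of_emod_eq_zero (by omega)
          exact hinv 2 (by omega) (by omega) (dvd_trans h2q hq3)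
      have ih := psiOuter_eq_sumPsi total m (if p = 2 then 3 else p + 2) hp' hodd' hinv'
      have hF : bFactor [] m p = bFactor [] m (if p = 2 then 3 else p + 2) := by
        conv_lhs => rw [bFactor, dif_pos h, dif_neg (fun hc => hd hc.1)]
      rw [psiOuter, dif_pos h, if_neg hd, ih, hF]
  · rw [psiOuter, dif_neg h, bFactor, dif_neg h]
    by_cases h1 : m > 1
    · rw [if_pos h1, if_pos h1]
      simp [sumPsi_single]
    · rw [if_neg h1, if_neg h1, sumPsi_nil]
      omega
termination_by (m + 1 - p).toNat
decreasing_by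
  · exact pv_dec_outer m p h
  · exact pv_dec_adv m p h

-- ===== VERDICT (by name: the statement is the Claim_ definition above) =====
theorem psi_value_spec : Claim_equal_psi_value := by
  intro n _
  unfold Spec_psi_value
  rw [psi_value_alt_eq]
  unfold psi_value
  split
  · rename_i h
    rcases h with h | h <;> subst h
    · rw [bFactor]; norm_num [sumPsi]; decide
    · rw [bFactor]; norm_num; rw [sumPsi_single]; decide
  · rw [psiOuter_eq_sumPsi 0 n 2 (by omega) (Or.inl rfl) (by intro q h1 h2; omega)]
    omega
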